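-- pv_equiv track=rewrite | github.com/akbarlintang/inventory-batik-genetic-algorithm | inventory_batik/inventory/views copy 3.py | calculate_inventory_levels_vendor
-- ===== SOURCE A (Python) =====
-- def calculate_inventory_levels_vendor(demand_data, restock_data):
--     inventory_level = []
--     units_lost_list = []
--     total_demand_list = []
--
--     inventory = 5000
--     review_period = 30
--     lead_time = 7
--     max_inventory = 5000
--
--     stock = 0
--     stockout = 0
--     counter = 0
--     purchases_freq = 0
--     purchases_total = 0
--     order_placed = False
--
--     for day, x in enumerate(demand_data):
--         if inventory - x >= 0:
--             inventory -= x
--             stock_out = 0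
--         elif inventory - x < 0:
--             inventory = 0
--             stockout += x
--             stock_out = x
--
--         inventory_level.append(inventory)
--         total_demand_list.append(x)
--         units_lost_list.append(stock_out)
--
--     return inventory_level, total_demand_list, units_lost_list, max_inventory, purchases_freq
-- ===== SOURCE B (Python) =====
-- def calculate_inventory_levels_vendor(demand_data, restock_data):
--     # Pass 1: inventory levels only.
--     levels = []
--     inv = 5000
--     for x in demand_data:
--         inv = inv - x if inv >= x else 0
--         levels.append(inv)
--     # Pass 2: losses derived by pairing each day's demand with the previous level.
--     losts = [x if prev < x else 0 for prev, x in zip([5000] + levels, demand_data)]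
--     return levels, list(demand_data), losts, 5000, 0
-- ===== Notes on version B (the rewrite author's own statement) =====
-- stated objective: alternative
-- what changed: A's single stateful loop appending three lists is replaced by a levels-only pass, a zip of shifted levels with demands to derive the loss list, and direct reuse of the demand list; the dead stockout state disappears.
import Mathlib
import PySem

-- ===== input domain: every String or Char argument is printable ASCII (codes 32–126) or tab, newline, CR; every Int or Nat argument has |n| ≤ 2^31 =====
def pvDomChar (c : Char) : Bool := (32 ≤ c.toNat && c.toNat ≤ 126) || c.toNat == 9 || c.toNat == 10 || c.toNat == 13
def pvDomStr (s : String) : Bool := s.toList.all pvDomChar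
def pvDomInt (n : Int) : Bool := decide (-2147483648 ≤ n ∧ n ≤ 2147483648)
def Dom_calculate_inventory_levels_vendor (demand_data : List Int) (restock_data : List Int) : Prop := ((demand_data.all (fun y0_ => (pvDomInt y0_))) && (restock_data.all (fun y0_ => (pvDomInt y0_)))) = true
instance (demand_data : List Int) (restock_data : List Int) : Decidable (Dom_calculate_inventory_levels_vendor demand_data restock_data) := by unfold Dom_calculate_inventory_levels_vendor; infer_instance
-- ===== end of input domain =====

-- B replaces A's single stateful loop (three appends + dead stockout state) by a levels-only
-- pass plus a zip-derived loss list; same cost, different decomposition (objective: alternative).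

-- ===== PORT A =====
-- state: (inventory, stockout, inventory_level, total_demand_list, units_lost_list)
def pvStepA (s : Int × Int × List Int × List Int × List Int) (x : Int) :
    Int × Int × List Int × List Int × List Int :=
  let (inventory, stockout, levels, totals, losts) := s
  let (inventory', stockout', stock_out) :=
    if inventory - x ≥ 0 then (inventory - x, stockout, (0 : Int))
    else ((0 : Int), stockout + x, x)
  (inventory', stockout', levels ++ [inventory'], totals ++ [x], losts ++ [stock_out])

def calculate_inventory_levels_vendor (demand_data : List Int) (restock_data : List Int) :
    List Int × List Int × List Int × Int × Int :=
  let max_inventory : Int := 5000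
  let purchases_freq : Int := 0
  let r := demand_data.foldl pvStepA ((5000 : Int), (0 : Int), ([] : List Int), ([] : List Int), ([] : List Int))
  (r.2.2.1, r.2.2.2.1, r.2.2.2.2, max_inventory, purchases_freq)

-- ===== PORT B =====
def pvStepB (p : Int × List Int) (x : Int) : Int × List Int :=
  let inv := if p.1 ≥ x then p.1 - x else 0
  (inv, p.2 ++ [inv])

def calculate_inventory_levels_vendor_alt (demand_data : List Int) (restock_data : List Int) :
    List Int × List Int × List Int × Int × Int :=
  let levels := (demand_data.foldl pvStepB ((5000 : Int), ([] : List Int))).2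
  let losts := (((5000 : Int) :: levels).zip demand_data).map
    (fun p => if p.1 < p.2 then p.2 else (0 : Int))
  (levels, demand_data, losts, 5000, 0)

-- ===== PRECONDITION & SPEC =====
def Spec_calculate_inventory_levels_vendor (demand_data : List Int) (restock_data : List Int) (out : List Int × List Int × List Int × Int × Int) : Prop := out = calculate_inventory_levels_vendor_alt demand_data restock_data
instance (demand_data : List Int) (restock_data : List Int) (out : List Int × List Int × List Int × Int × Int) : Decidable (Spec_calculate_inventory_levels_vendor demand_data restock_data out) := by unfold Spec_calculate_inventory_levels_vendor; infer_instance

-- ===== CLAIM (what is proved, stated in full; the proofs are below) =====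
def Claim_equal_calculate_inventory_levels_vendor : Prop := ∀ (demand_data : List Int) (restock_data : List Int), Dom_calculate_inventory_levels_vendor demand_data restock_data → Spec_calculate_inventory_levels_vendor demand_data restock_data (calculate_inventory_levels_vendor demand_data restock_data)

-- ===== LEMMAS AND PROOFS =====

-- reference recursions: the inventory-level list and the units-lost list from inventory `inv`
def pvLv (inv : Int) : List Int → List Int
  | [] => []
  | x :: r =>
    let inv' := if inv - x ≥ 0 then inv - x else 0
    inv' :: pvLv inv' r

def pvLo (inv : Int) : List Int → List Int
  | [] => []
  | x :: r =>
    (if inv - x ≥ 0 then (0 : Int) else x) :: pvLo (if inv - x ≥ 0 then inv - x else 0) r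

theorem foldA_eq (xs : List Int) (inv so : Int) (L T Lo : List Int) :
    (xs.foldl pvStepA (inv, so, L, T, Lo)).2.2 =
      (L ++ pvLv inv xs, T ++ xs, Lo ++ pvLo inv xs) := by
  induction xs generalizing inv so L T Lo with
  | nil => simp [pvLv, pvLo]
  | cons x r ih =>
    by_cases h : x ≤ inv <;>
      simp [List.foldl, pvStepA, h, ih, pvLv, pvLo]

theorem foldB_eq (xs : List Int) (inv : Int) (L : List Int) :
    (xs.foldl pvStepB (inv, L)).2 = L ++ pvLv inv xs := by
  induction xs generalizing inv L with
  | nil => simp [pvLv]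
  | cons x r ih =>
    by_cases h : inv - x ≥ 0
    · have hx : inv ≥ x := by omega
      simp [List.foldl, pvStepB, hx, ih, pvLv]
    · have hx : ¬ inv ≥ x := by omega
      simp [List.foldl, pvStepB, hx, ih, pvLv]

theorem zip_losts (xs : List Int) (inv : Int) :
    ((inv :: pvLv inv xs).zip xs).map (fun p => if p.1 < p.2 then p.2 else (0 : Int)) =
      pvLo inv xs := by
  induction xs generalizing inv with
  | nil => simp [pvLv, pvLo]
  | cons x r ih =>
    by_cases h : inv - x ≥ 0
    · have hx : ¬ inv < x := by omega
      simp [pvLv, pvLo, hx, ih]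
    · have hx : inv < x := by omega
      simp [pvLv, pvLo, hx, ih]

-- ===== VERDICT (by name: the statement is the Claim_ definition above) =====
theorem calculate_inventory_levels_vendor_spec : Claim_equal_calculate_inventory_levels_vendor := by
  intro d r _
  unfold Spec_calculate_inventory_levels_vendor
  unfold calculate_inventory_levels_vendor calculate_inventory_levels_vendor_alt
  have hA := foldA_eq d 5000 0 [] [] []
  have hB := foldB_eq d 5000 []
  simp only [List.nil_append] at hA hB
  simp [hA, hB, zip_losts]
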